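-- pv_equiv track=rewrite | github.com/re1n/LogiQ | logic.py | deepest_bracket_level
-- ===== SOURCE A (Python) =====
-- def deepest_bracket_level(string):
--     stack = []
--     max_depth = 0
--     depth = 0
--     num_occurrences = 0
--     for char in string:
--         if char == "(":
--             stack.append(char)
--             depth += 1
--             if depth > max_depth:
--                 max_depth = depth
--                 num_occurrences = 1
--             elif depth == max_depth:
--                 num_occurrences += 1
--         elif char == ")":
--             stack.pop()
--             depth -= 1
--     return max_depth, num_occurrences
-- ===== SOURCE B (Python) =====
-- def deepest_bracket_level(string):
--     # Phase 1: record the nesting depth of every '(' in a table.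
--     stack = []
--     depths = []
--     for char in string:
--         if char == "(":
--             stack.append(char)
--             depths.append(len(stack))
--         elif char == ")":
--             stack.pop()
--     # Phase 2: reduce the table.
--     if not depths:
--         return 0, 0
--     m = max(depths)
--     return m, depths.count(m)
-- ===== Notes on version B (the rewrite author's own statement) =====
-- stated objective: alternative
-- what changed: Replaces A's online max/count accumulators threaded through the scan with a collect-then-reduce decomposition: phase 1 builds an explicit table of the depth of every '(' (the stack itself carries the depth as its length), phase 2 computes max(depths) and depths.count(max) with the built-ins.
import Mathlib
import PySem

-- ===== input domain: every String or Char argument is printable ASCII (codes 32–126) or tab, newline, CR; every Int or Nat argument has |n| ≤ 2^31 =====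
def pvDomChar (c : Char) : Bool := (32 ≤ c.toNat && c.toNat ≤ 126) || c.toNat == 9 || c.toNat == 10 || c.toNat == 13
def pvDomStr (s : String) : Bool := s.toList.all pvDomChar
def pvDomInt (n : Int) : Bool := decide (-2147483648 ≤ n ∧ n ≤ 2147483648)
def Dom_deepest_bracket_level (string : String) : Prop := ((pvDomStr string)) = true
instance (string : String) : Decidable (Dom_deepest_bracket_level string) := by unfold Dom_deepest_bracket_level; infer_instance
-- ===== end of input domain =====

-- B replaces A's online max/count accumulators with a collect-then-reduce decomposition
-- (phase 1 tables the depth of every '(', phase 2 reduces with max/count); alternative, same cost.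


-- ===== PORT A =====
-- A's for-loop; state (stack, max_depth, depth, num_occurrences); none = IndexError from stack.pop() on [].
def pvLoopA : List Char → List Char → Int → Int → Int → Option (List Char × Int × Int × Int)
  | [], stack, md, d, n => some (stack, md, d, n)
  | c :: cs, stack, md, d, n =>
    if c = '(' then
      if d + 1 > md then pvLoopA cs (stack ++ [c]) (d + 1) (d + 1) 1
      else if d + 1 = md then pvLoopA cs (stack ++ [c]) md (d + 1) (n + 1)
      else pvLoopA cs (stack ++ [c]) md (d + 1) n
    else if c = ')' then
      match PySem.List.pop? stack with
      | none => none
      | some (_, stack') => pvLoopA cs stack' md (d - 1) n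
    else pvLoopA cs stack md d n

def deepest_bracket_level (string : String) : Int × Int :=
  match pvLoopA string.toList [] 0 0 0 with
  | some (_, md, _, n) => (md, n)
  | none => (0, 0)   -- unreachable under Pre_: Python raises IndexError here

-- ===== PORT B =====
-- B phase 1: build the table of depths of every '('; none = IndexError from stack.pop() on [].
def pvLoopB : List Char → List Char → List Int → Option (List Char × List Int)
  | [], stack, depths => some (stack, depths)
  | c :: cs, stack, depths =>
    if c = '(' then
      pvLoopB cs (stack ++ [c]) (depths ++ [((stack ++ [c]).length : Int)])
    else if c = ')' then
      match PySem.List.pop? stack with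
      | none => none
      | some (_, stack') => pvLoopB cs stack' depths
    else pvLoopB cs stack depths

def deepest_bracket_level_alt (string : String) : Int × Int :=
  match pvLoopB string.toList [] [] with
  | some (_, depths) =>
    -- phase 2: 'if not depths: return 0, 0' then 'm = max(depths); return m, depths.count(m)'
    match PySem.List.max? depths (fun x => x) with
    | none => (0, 0)
    | some m => (m, (PySem.List.count depths m : Int))
  | none => (0, 0)   -- unreachable under Pre_: Python raises IndexError here

-- ===== PRECONDITION & SPEC =====
-- Pre_ excludes exactly the strings with a prefix containing more ')' than '(' : there
-- Python A raises IndexError at stack.pop() (and Python B raises the same way).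
def Pre_deepest_bracket_level (string : String) : Prop :=
  ∀ i ≤ string.toList.length,
    ((string.toList.take i).count ')' : Int) ≤ ((string.toList.take i).count '(' : Int)
instance (string : String) : Decidable (Pre_deepest_bracket_level string) := by
  unfold Pre_deepest_bracket_level; infer_instance

def pvWitness_deepest_bracket_level : String := "(a(b))(c)"

def Spec_deepest_bracket_level (string : String) (out : Int × Int) : Prop := out = deepest_bracket_level_alt string
instance (string : String) (out : Int × Int) : Decidable (Spec_deepest_bracket_level string out) := by unfold Spec_deepest_bracket_level; infer_instance

-- ===== CLAIM (what is proved, stated in full; the proofs are below) =====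
def Claim_equal_deepest_bracket_level : Prop := ∀ (string : String), Dom_deepest_bracket_level string → Pre_deepest_bracket_level string → Spec_deepest_bracket_level string (deepest_bracket_level string)

-- ===== LEMMAS AND PROOFS =====

-- the depth of every '(' in l, scanning with current depth d (pure specification common to both ports)
def pvDepths : List Char → Int → List Int
  | [], _ => []
  | c :: cs, d =>
    if c = '(' then (d + 1) :: pvDepths cs (d + 1)
    else if c = ')' then pvDepths cs (d - 1)
    else pvDepths cs d

-- A's online update as a fold step
def pvStep : Int × Int → Int → Int × Int
  | (m, k), x => if x > m then (x, 1) else if x = m then (m, k + 1) else (m, k)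

-- balanced-prefix condition relative to a starting depth d
def pvBal (l : List Char) (d : Int) : Prop :=
  ∀ i ≤ l.length, 0 ≤ d + ((l.take i).count '(' : Int) - ((l.take i).count ')' : Int)

lemma pvBal_cons {c : Char} {cs : List Char} {d : Int} (h : pvBal (c :: cs) d) :
    pvBal cs (if c = '(' then d + 1 else if c = ')' then d - 1 else d) := by
  intro i hi
  have h2 := h (i + 1) (by simp; omega)
  rw [List.take_succ_cons] at h2
  by_cases h1 : c = '('
  · simp [h1] at h2 ⊢
    omega
  · by_cases h3 : c = ')'
    · simp [h3] at h2 ⊢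
      omega
    · simp [h1, h3] at h2 ⊢
      omega

lemma pvBal_head {cs : List Char} {d : Int} (h : pvBal (')' :: cs) d) : 1 ≤ d := by
  have h1 := h 1 (by simp)
  simp at h1
  omega

lemma pvDepths_pos : ∀ (l : List Char) (d : Int), 0 ≤ d → pvBal l d →
    ∀ x ∈ pvDepths l d, 1 ≤ x := by
  intro l
  induction l with
  | nil => intro d _ _ x hx; simp [pvDepths] at hx
  | cons c cs ih =>
    intro d hd hb x hx
    have hb' := pvBal_cons hb
    by_cases h1 : c = '('
    · simp [h1] at hb'
      simp [pvDepths, h1] at hx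
      rcases hx with hx | hx
      · omega
      · exact ih (d + 1) (by omega) hb' x hx
    · by_cases h3 : c = ')'
      · have hd1 : 1 ≤ d := pvBal_head (h3 ▸ hb)
        simp [h3] at hb'
        simp [pvDepths, h1, h3] at hx
        exact ih (d - 1) (by omega) hb' x hx
      · simp [h1, h3] at hb'
        simp [pvDepths, h1, h3] at hx
        exact ih d hd hb' x hx

lemma pvLoopA_eq : ∀ (l : List Char) (stack : List Char) (md d n : Int),
    0 ≤ d → (stack.length : Int) = d → pvBal l d →
    ∃ st dd, pvLoopA l stack md d n =
      some (st, (List.foldl pvStep (md, n) (pvDepths l d)).1, dd,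
                 (List.foldl pvStep (md, n) (pvDepths l d)).2) := by
  intro l
  induction l with
  | nil => intro stack md d n _ _ _; exact ⟨stack, d, rfl⟩
  | cons c cs ih =>
    intro stack md d n hd hlen hb
    have hb' := pvBal_cons hb
    by_cases h1 : c = '('
    · subst h1
      simp at hb'
      have hlen' : (((stack ++ ['(']).length : Int)) = d + 1 := by
        simp; omega
      have hrec := ih (stack ++ ['(']) (pvStep (md, n) (d + 1)).1 (d + 1)
        (pvStep (md, n) (d + 1)).2 (by omega) hlen' hb'
      simp only [pvDepths, pvLoopA, if_pos, List.foldl_cons]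
      simp only [pvStep]
      by_cases hgt : d + 1 > md
      · simpa [hgt, pvStep] using hrec
      · by_cases heq : d + 1 = md
        · simpa [hgt, heq, pvStep] using hrec
        · simpa [hgt, heq, pvStep] using hrec
    · by_cases h3 : c = ')'
      · subst h3
        have hd1 : 1 ≤ d := pvBal_head hb
        simp [h1] at hb'
        rcases List.eq_nil_or_concat stack with hnil | ⟨xs, x, hxs⟩
        · exfalso; rw [hnil] at hlen; simp at hlen; omega
        · rw [List.concat_eq_append] at hxs
          subst hxs
          have hlen' : ((xs.length : Int)) = d - 1 := by
            simp at hlen; omega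
          have hrec := ih xs md (d - 1) n (by omega) hlen' hb'
          simp only [pvDepths, pvLoopA, h1, PySem.List.pop?_last]
          simpa [h1] using hrec
      · simp [h1, h3] at hb'
        have hrec := ih stack md d n hd hlen hb'
        simp only [pvDepths, pvLoopA]
        simpa [h1, h3] using hrec

lemma pvLoopB_eq : ∀ (l : List Char) (stack : List Char) (acc : List Int) (d : Int),
    0 ≤ d → (stack.length : Int) = d → pvBal l d →
    ∃ st, pvLoopB l stack acc = some (st, acc ++ pvDepths l d) := by
  intro l
  induction l with
  | nil => intro stack acc d _ _ _; exact ⟨stack, by simp [pvLoopB, pvDepths]⟩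
  | cons c cs ih =>
    intro stack acc d hd hlen hb
    have hb' := pvBal_cons hb
    by_cases h1 : c = '('
    · subst h1
      simp at hb'
      have hlen' : (((stack ++ ['(']).length : Int)) = d + 1 := by simp; omega
      have hrec := ih (stack ++ ['(']) (acc ++ [d + 1]) (d + 1) (by omega) hlen' hb'
      rcases hrec with ⟨st, hst⟩
      refine ⟨st, ?_⟩
      simp only [pvLoopB, pvDepths, if_pos]
      rw [hlen', hst, List.append_assoc]
      simp
    · by_cases h3 : c = ')'
      · subst h3
        have hd1 : 1 ≤ d := pvBal_head hb
        simp [h1] at hb'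
        rcases List.eq_nil_or_concat stack with hnil | ⟨xs, x, hxs⟩
        · exfalso; rw [hnil] at hlen; simp at hlen; omega
        · rw [List.concat_eq_append] at hxs
          subst hxs
          have hlen' : ((xs.length : Int)) = d - 1 := by
            simp at hlen; omega
          have hrec := ih xs acc (d - 1) (by omega) hlen' hb'
          simp only [pvLoopB, pvDepths, h1, PySem.List.pop?_last]
          simpa [h1] using hrec
      · simp [h1, h3] at hb'
        have hrec := ih stack acc d hd hlen hb'
        simp only [pvLoopB, pvDepths]
        simpa [h1, h3] using hrec

-- A's online fold computes (running max, count of the running max)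
lemma pvStep_foldl : ∀ (xs : List Int) (m k : Int),
    List.foldl pvStep (m, k) xs =
      (List.foldl max m xs,
       (if m = List.foldl max m xs then k else 0) + (List.count (List.foldl max m xs) xs : Int)) := by
  intro xs
  induction xs with
  | nil => intro m k; simp
  | cons x t ih =>
    intro m k
    rcases lt_trichotomy m x with hlt | heq | hgt
    · have hm : max m x = x := max_eq_right (le_of_lt hlt)
      have hx : x ≤ List.foldl max x t := (PySem.List.le_foldl_max t x).1
      have hs : pvStep (m, k) x = (x, 1) := by
        simp only [pvStep]; rw [if_pos hlt]
      rw [List.foldl_cons, hs, ih x 1]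
      simp only [List.foldl_cons, hm]
      have hne : ¬ m = List.foldl max x t := by omega
      simp only [hne, if_false, List.count_cons]
      by_cases hxeq : x = List.foldl max x t
      · simp [← hxeq]; omega
      · have hb : ¬ ((x == List.foldl max x t) = true) := by simpa using hxeq
        simp [hb, hxeq]
    · subst heq
      have hm : max m m = m := max_self m
      have hs : pvStep (m, k) m = (m, k + 1) := by
        simp [pvStep]
      rw [List.foldl_cons, hs, ih m (k + 1)]
      simp only [List.foldl_cons, hm]
      have hmle : m ≤ List.foldl max m t := (PySem.List.le_foldl_max t m).1
      simp only [List.count_cons]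
      by_cases hmeq : m = List.foldl max m t
      · simp [← hmeq, Prod.mk.injEq]
        omega
      · have hb : ¬ ((m == List.foldl max m t) = true) := by simpa using hmeq
        simp [hmeq, hb]
    · have hm : max m x = m := max_eq_left (le_of_lt hgt)
      have hs : pvStep (m, k) x = (m, k) := by
        simp only [pvStep]; rw [if_neg (by omega), if_neg (by omega)]
      rw [List.foldl_cons, hs, ih m k]
      simp only [List.foldl_cons, hm]
      have hmle : m ≤ List.foldl max m t := (PySem.List.le_foldl_max t m).1
      have hb : ¬ ((x == List.foldl max m t) = true) := by simp; omega
      simp [List.count_cons, hb]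

lemma pre_bal {s : String} (h : Pre_deepest_bracket_level s) : pvBal s.toList 0 := by
  intro i hi
  have := h i hi
  omega

-- ===== VERDICT (by name: the statement is the Claim_ definition above) =====
theorem deepest_bracket_level_spec : Claim_equal_deepest_bracket_level := by
  intro s _ hpre
  unfold Spec_deepest_bracket_level deepest_bracket_level deepest_bracket_level_alt
  have hb := pre_bal hpre
  obtain ⟨st, dd, hA⟩ := pvLoopA_eq s.toList [] 0 0 0 le_rfl rfl hb
  obtain ⟨st2, hB⟩ := pvLoopB_eq s.toList [] [] 0 le_rfl rfl hb
  rw [hA, hB]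
  simp only [List.nil_append]
  have hpos := pvDepths_pos s.toList 0 le_rfl hb
  rcases hD : pvDepths s.toList 0 with _ | ⟨x, t⟩
  · simp [PySem.List.max?]
  · rw [PySem.List.max?_id_cons]
    have hx1 : 1 ≤ x := hpos x (by rw [hD]; simp)
    rw [pvStep_foldl]
    have hmax : List.foldl max 0 (x :: t) = List.foldl max x t := by
      simp [max_eq_right (by omega : (0:Int) ≤ x)]
    have hge : x ≤ List.foldl max x t := (PySem.List.le_foldl_max t x).1
    rw [hmax]
    have hne : ¬ (0 : Int) = List.foldl max x t := by omega
    simp [hne, PySem.List.count_eq]
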